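-- pv_equiv track=rewrite | github.com/wjieun/codetree-samsung | 1/격자숫자놀이.py | sort_line
-- ===== SOURCE A (Python) =====
-- def sort_line(line):
--     cnt_by_num = dict()
--     for l in line:
--         if l != 0:
--             if l in cnt_by_num:
--                 cnt_by_num[l] += 1
--             else:
--                 cnt_by_num[l] = 1
--
--     num_by_cnt = dict()
--     for c in cnt_by_num:
--         if cnt_by_num[c] in num_by_cnt:
--             num_by_cnt[cnt_by_num[c]].append(c)
--         else:
--             num_by_cnt[cnt_by_num[c]] = [c]
--
--     sort_cnt = sorted(num_by_cnt.keys(), key=lambda x:x)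
--
--     new_line = []
--     for cnt in sort_cnt:
--         num_list = num_by_cnt[cnt]
--         sorted_num_list = sorted(num_list)
--
--         for num in sorted_num_list:
--             new_line.extend([num, cnt])
--     return new_line
-- ===== SOURCE B (Python) =====
-- def sort_line(line):
--     freq = {}
--     for x in line:
--         if x != 0:
--             freq[x] = freq.get(x, 0) + 1
--     new_line = []
--     for num, cnt in sorted(freq.items(), key=lambda kv: (kv[1], kv[0])):
--         new_line += [num, cnt]
--     return new_line
-- ===== Notes on version B (the rewrite author's own statement) =====
-- stated objective: simpler
-- what changed: B drops A's count->values inverse dict and its two nested sorts, doing a single sort of the (value,count) frequency items keyed by (count,value) and flattening the pairs.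
import Mathlib
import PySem

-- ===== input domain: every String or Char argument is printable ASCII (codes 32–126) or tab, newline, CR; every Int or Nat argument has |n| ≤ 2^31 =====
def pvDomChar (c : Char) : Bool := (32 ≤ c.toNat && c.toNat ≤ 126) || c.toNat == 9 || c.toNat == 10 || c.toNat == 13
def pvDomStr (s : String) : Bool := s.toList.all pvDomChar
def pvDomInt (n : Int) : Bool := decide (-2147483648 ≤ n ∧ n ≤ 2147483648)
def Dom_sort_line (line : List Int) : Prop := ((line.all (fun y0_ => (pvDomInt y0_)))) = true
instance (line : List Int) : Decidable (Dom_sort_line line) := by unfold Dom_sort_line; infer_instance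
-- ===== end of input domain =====

-- B replaces A's count->values inverse dict plus two nested sorts by a single sort of the
-- frequency items keyed by (count, value), flattened; same result, simpler decomposition.


-- ===== PORT A =====
def sort_line (line : List Int) : List Int :=
  let cnt_by_num : PySem.Dict Int Int :=
    line.foldl (fun d l =>
      if l ≠ 0 then
        (if d.contains l then d.insert l (d.getD l 0 + 1) else d.insert l 1)
      else d) PySem.Dict.empty
  let num_by_cnt : PySem.Dict Int (List Int) :=
    cnt_by_num.keys.foldl (fun d c =>
      if d.contains (cnt_by_num.getD c 0) then
        d.modify (cnt_by_num.getD c 0) [] (· ++ [c])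
      else d.insert (cnt_by_num.getD c 0) [c]) PySem.Dict.empty
  let sort_cnt := PySem.List.sorted num_by_cnt.keys (fun x => x)
  sort_cnt.foldl (fun new_line cnt =>
    (PySem.List.sorted (num_by_cnt.getD cnt []) (fun x => x)).foldl
      (fun acc num => acc ++ [num, cnt]) new_line) []

-- ===== PORT B =====
def sort_line_alt (line : List Int) : List Int :=
  let freq : PySem.Dict Int Int :=
    line.foldl (fun d x => if x ≠ 0 then d.insert x (d.getD x 0 + 1) else d) PySem.Dict.empty
  (PySem.List.sorted2 freq.items (fun kv => kv.2) (fun kv => kv.1)).foldl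
    (fun acc kv => acc ++ [kv.1, kv.2]) []

-- ===== PRECONDITION & SPEC =====
def Spec_sort_line (line : List Int) (out : List Int) : Prop := out = sort_line_alt line
instance (line : List Int) (out : List Int) : Decidable (Spec_sort_line line out) := by unfold Spec_sort_line; infer_instance

-- ===== CLAIM (what is proved, stated in full; the proofs are below) =====
def Claim_equal_sort_line : Prop := ∀ (line : List Int), Dom_sort_line line → Spec_sort_line line (sort_line line)

-- ===== LEMMAS AND PROOFS =====

-- sorted2 with two Int keys is sorted with the lexicographic key
theorem sorted2_eq_sorted_lex {α : Type} (xs : List α) (k1 k2 : α → Int) :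
    PySem.List.sorted2 xs k1 k2 = PySem.List.sorted xs (fun a => toLex (k1 a, k2 a)) := by
  unfold PySem.List.sorted2 PySem.List.sorted
  simp only [if_neg Bool.false_ne_true]
  have h : (fun a b => decide (k1 a < k1 b) || (!decide (k1 b < k1 a) && decide (k2 a < k2 b)))
      = (fun a b => decide ((toLex (k1 a, k2 a) : Lex (Int × Int)) < toLex (k1 b, k2 b))) := by
    funext a b
    rw [Bool.eq_iff_iff]
    simp only [Bool.or_eq_true, Bool.and_eq_true, Bool.not_eq_true', decide_eq_false_iff_not,
      decide_eq_true_eq, Prod.Lex.lt_iff]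
    simp only [ofLex_toLex]
    omega
  rw [h]


-- the heart: sorting the (value,count) pairs by (count,value) is: sorted distinct counts,
-- then sorted values per count
theorem pairs_sorted_char (K : List Int) (hK : K.Nodup) (cq : Int → Int) :
    PySem.List.sorted (K.map (fun k => (k, cq k))) (fun kv => toLex (kv.2, kv.1))
      = (PySem.List.sorted (PySem.Set.ofList (K.map cq)) (fun x => x)).flatMap
          (fun v => (PySem.List.sorted (K.filter (fun c => cq c == v)) (fun x => x)).map
            (fun n => (n, v))) := by
  have hpw : ((PySem.List.sorted (PySem.Set.ofList (K.map cq)) (fun x => x)).flatMap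
          (fun v => (PySem.List.sorted (K.filter (fun c => cq c == v)) (fun x => x)).map
            (fun n => (n, v)))).Pairwise
        (fun a b => (toLex (a.2, a.1) : Lex (Int × Int)) < toLex (b.2, b.1)) := by
    rw [List.pairwise_flatMap]
    constructor
    · intro v hv
      rw [List.pairwise_map]
      have h1 := PySem.List.sorted_pairwise (K.filter (fun c => cq c == v)) (fun x => x)
      have hnd : (PySem.List.sorted (K.filter (fun c => cq c == v)) (fun x => x)).Nodup :=
        ((PySem.List.sorted_perm _ _ _).nodup_iff).mpr (hK.filter _)
      refine (h1.and hnd).imp ?_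
      intro a b hab
      simp only [Prod.Lex.lt_iff, ofLex_toLex]
      exact Or.inr ⟨trivial, lt_of_le_of_ne hab.1 hab.2⟩
    · refine (PySem.List.sorted_ofList_pairwise_lt (K.map cq)).imp ?_
      intro v w hvw x hx y hy
      simp only [List.mem_map] at hx hy
      obtain ⟨n, _, rfl⟩ := hx
      obtain ⟨m, _, rfl⟩ := hy
      simp only [Prod.Lex.lt_iff, ofLex_toLex]
      exact Or.inl hvw
  apply PySem.List.sorted_eq_of_perm_of_pairwise_lt _ _ _ ?_ hpw
  have hxsN : (K.map (fun k => (k, cq k))).Nodup :=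
    hK.map (fun a b h => congrArg Prod.fst h)
  have hysN := (List.Pairwise.imp (fun {a b} h he => by subst he; exact lt_irrefl _ h) hpw : _root_.List.Nodup _)
  rw [List.perm_ext_iff_of_nodup hysN hxsN]
  intro p
  simp only [List.mem_flatMap, List.mem_map, PySem.List.mem_sorted, List.mem_filter,
    PySem.Set.mem_ofList, beq_iff_eq]
  constructor
  · rintro ⟨v, hv, n, ⟨hnK, hcq⟩, rfl⟩
    exact ⟨n, hnK, by rw [hcq]⟩
  · rintro ⟨k, hk, rfl⟩
    exact ⟨cq k, ⟨k, hk, rfl⟩, k, ⟨hk, rfl⟩, rfl⟩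

theorem sort_line_eq_alt (line : List Int) : sort_line line = sort_line_alt line := by
  unfold sort_line sort_line_alt
  dsimp only
  have hcnt : line.foldl (fun d l =>
      if l ≠ 0 then
        (if d.contains l then d.insert l (d.getD l 0 + 1) else d.insert l 1)
      else d) PySem.Dict.empty
      = PySem.Dict.counter (line.filter (fun x => decide (x ≠ 0))) := by
    rw [PySem.List.foldl_ite_eq_foldl_filter (p := fun (l : Int) => l ≠ 0)]
    rw [← PySem.Dict.foldl_insert_getD_add_one_eq_counter]
    apply PySem.List.foldl_congr_mem
    intro d x hx
    by_cases h : d.contains x = true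
    · simp [h]
    · rw [if_neg (by simp [h]),
        PySem.Dict.getD_of_not_contains _ _ (by simpa using h)]
      norm_num
  have hfreq : line.foldl (fun d x => if x ≠ 0 then d.insert x (d.getD x 0 + 1) else d)
      PySem.Dict.empty = PySem.Dict.counter (line.filter (fun x => decide (x ≠ 0))) := by
    rw [PySem.List.foldl_ite_eq_foldl_filter (p := fun (l : Int) => l ≠ 0)]
    exact PySem.Dict.foldl_insert_getD_add_one_eq_counter _
  rw [hcnt, hfreq]
  set xs := line.filter (fun x => decide (x ≠ 0)) with hxsdef
  have hKnd : (PySem.Set.ofList xs).Nodup := PySem.Set.nodup_ofList xs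
  rw [PySem.Dict.keys_counter, PySem.Dict.items_counter]
  -- the num_by_cnt fold is a modify-fold keyed by the count
  have hnbc : (PySem.Set.ofList xs).foldl (fun d c =>
      if d.contains ((PySem.Dict.counter xs).getD c 0) then
        d.modify ((PySem.Dict.counter xs).getD c 0) [] (· ++ [c])
      else d.insert ((PySem.Dict.counter xs).getD c 0) [c]) PySem.Dict.empty
      = (PySem.Set.ofList xs).foldl
          (fun d c => d.modify ((List.count c xs : Nat) : Int) [] (· ++ [c]))
          PySem.Dict.empty := by
    apply PySem.List.foldl_congr_mem
    intro d c hc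
    rw [PySem.Dict.getD_counter]
    by_cases h : d.contains ((List.count c xs : Nat) : Int) = true
    · rw [if_pos h]
    · rw [if_neg (by simp [h])]
      simp only [PySem.Dict.modify, PySem.Dict.getD_of_not_contains _ _ (by simpa using h),
        List.nil_append]
  rw [hnbc]
  have hkeys : ((PySem.Set.ofList xs).foldl
      (fun d c => d.modify ((List.count c xs : Nat) : Int) [] (· ++ [c]))
      PySem.Dict.empty).keys
      = PySem.Set.ofList ((PySem.Set.ofList xs).map (fun c => ((List.count c xs : Nat) : Int))) := by
    rw [PySem.Dict.keys_foldl_modify_key (PySem.Set.ofList xs)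
      (fun c => ((List.count c xs : Nat) : Int)) [] (fun _ c v => v ++ [c])]
    rw [PySem.Dict.keys_empty, PySem.Set.update_nil_left]
  rw [hkeys]
  have hgetD : ∀ v, ((PySem.Set.ofList xs).foldl
      (fun d c => d.modify ((List.count c xs : Nat) : Int) [] (· ++ [c]))
      PySem.Dict.empty).getD v []
      = (PySem.Set.ofList xs).filter (fun c => ((List.count c xs : Nat) : Int) == v) := by
    intro v
    rw [show ((PySem.Set.ofList xs).foldl
        (fun d c => d.modify ((List.count c xs : Nat) : Int) [] (· ++ [c])) PySem.Dict.empty)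
        = (((PySem.Set.ofList xs).map (fun c => (((List.count c xs : Nat) : Int), c))).foldl
            (fun d p => d.modify p.1 [] (· ++ [p.2])) PySem.Dict.empty) from
      (List.foldl_map (f := fun c => (((List.count c xs : Nat) : Int), c))
        (g := fun (d : PySem.Dict Int (List Int)) (p : Int × Int) =>
          d.modify p.1 [] (· ++ [p.2]))).symm]
    rw [PySem.Dict.getD_foldl_modify_append]
    simp [List.filter_map, Function.comp_def, List.map_map]
  -- flatten both sides to flatMaps over the same pair list
  rw [sorted2_eq_sorted_lex, pairs_sorted_char (PySem.Set.ofList xs) hKnd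
    (fun k => ((List.count k xs : Nat) : Int))]
  rw [PySem.List.foldl_append_eq_flatMap (g := fun kv : Int × Int => [kv.1, kv.2]), List.nil_append]
  have houter : ∀ (L : List Int),
      L.foldl (fun new_line cnt =>
        (PySem.List.sorted (((PySem.Set.ofList xs).foldl
            (fun d c => d.modify ((List.count c xs : Nat) : Int) [] (· ++ [c]))
            PySem.Dict.empty).getD cnt []) (fun x => x)).foldl
          (fun acc num => acc ++ [num, cnt]) new_line) []
      = L.flatMap (fun cnt =>
          (PySem.List.sorted ((PySem.Set.ofList xs).filter
            (fun c => ((List.count c xs : Nat) : Int) == cnt)) (fun x => x)).flatMap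
            (fun num => [num, cnt])) := by
    intro L
    rw [PySem.List.foldl_congr_mem _ _ (fun new_line cnt => new_line ++
        (PySem.List.sorted ((PySem.Set.ofList xs).filter
          (fun c => ((List.count c xs : Nat) : Int) == cnt)) (fun x => x)).flatMap
          (fun num => [num, cnt])) _ ?_]
    · rw [PySem.List.foldl_append_eq_flatMap, List.nil_append]
    · intro acc cnt hcnt2
      rw [hgetD cnt, PySem.List.foldl_append_eq_flatMap (g := fun num => [num, cnt])]
  rw [houter]
  simp [List.flatMap_assoc, List.flatMap_map]

-- ===== VERDICT (by name: the statement is the Claim_ definition above) =====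
theorem sort_line_spec : Claim_equal_sort_line := by
  intro line _
  exact sort_line_eq_alt line
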